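-- pv_equiv track=rewrite | github.com/yannickloth/W33-Theory | scripts/w33_leech_monster.py | _qpoly_pow
-- ===== SOURCE A (Python) =====
-- def _qpoly_mul(a: list[int], b: list[int], max_deg: int) -> list[int]:
--     out = [0] * (max_deg + 1)
--     for i, ai in enumerate(a[: max_deg + 1]):
--         if ai == 0:
--             continue
--         max_j = max_deg - i
--         for j, bj in enumerate(b[: max_j + 1]):
--             if bj == 0:
--                 continue
--             out[i + j] += ai * bj
--     return out
--
-- def _qpoly_pow(base: list[int], exp: int, max_deg: int) -> list[int]:
--     if exp < 0:
--         raise ValueError("exp must be non-negative")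
--     result = [0] * (max_deg + 1)
--     result[0] = 1
--     cur = base[: max_deg + 1] + [0] * max(0, (max_deg + 1) - len(base))
--     e = exp
--     while e:
--         if e & 1:
--             result = _qpoly_mul(result, cur, max_deg)
--         e >>= 1
--         if e:
--             cur = _qpoly_mul(cur, cur, max_deg)
--     return result
-- ===== SOURCE B (Python) =====
-- def _qpoly_pow(base: list[int], exp: int, max_deg: int) -> list[int]:
--     if exp < 0:
--         raise ValueError("exp must be non-negative")
--     n = max_deg + 1
--     result = [1] + [0] * max_deg
--     for _ in range(exp):
--         result = [
--             sum(result[i] * base[k - i] for i in range(max(0, k - len(base) + 1), k + 1))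
--             for k in range(n)
--         ]
--     return result
-- ===== Notes on version B (the rewrite author's own statement) =====
-- stated objective: simpler
-- what changed: B drops both A's square-and-multiply exponent loop and A's skip-zero accumulation multiplier: it multiplies exp times, and each product coefficient is computed directly as a bounded convolution sum in a comprehension instead of in-place accumulation over two nested enumerate loops.
import Mathlib
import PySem

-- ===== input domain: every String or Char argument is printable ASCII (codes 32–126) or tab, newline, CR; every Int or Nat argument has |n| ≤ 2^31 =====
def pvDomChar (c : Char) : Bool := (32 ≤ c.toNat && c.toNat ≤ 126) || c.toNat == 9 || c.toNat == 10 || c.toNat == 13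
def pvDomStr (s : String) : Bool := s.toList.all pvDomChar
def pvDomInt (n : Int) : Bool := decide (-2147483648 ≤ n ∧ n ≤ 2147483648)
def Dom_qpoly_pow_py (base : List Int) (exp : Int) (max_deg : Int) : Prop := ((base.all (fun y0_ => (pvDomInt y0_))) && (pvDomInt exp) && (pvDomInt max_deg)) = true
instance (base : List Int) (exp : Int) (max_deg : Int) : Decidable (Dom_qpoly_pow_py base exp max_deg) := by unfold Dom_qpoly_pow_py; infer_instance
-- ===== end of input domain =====

-- B replaces A's square-and-multiply exponentiation and zero-skipping in-place multiplier by
-- exp plain multiplications whose coefficients are direct bounded convolution sums; objective: simpler.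

-- ===== PORT A =====
-- helper _qpoly_mul: inner 'for j, bj in enumerate(b[:max_j+1])' as structural recursion carrying j
def qmulInner (ai : Int) (i : Nat) (bs : List Int) (j : Nat) (out : List Int) : List Int :=
  match bs with
  | [] => out
  | bj :: rest =>
      qmulInner ai i rest (j + 1)
        (if bj = 0 then out else out.set (i + j) (out.getD (i + j) 0 + ai * bj))

-- outer 'for i, ai in enumerate(a[:max_deg+1])' carrying i
def qmulOuter (b : List Int) (max_deg : Int) (as_ : List Int) (i : Nat) (out : List Int) : List Int :=
  match as_ with
  | [] => out
  | ai :: rest =>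
      qmulOuter b max_deg rest (i + 1)
        (if ai = 0 then out
         else qmulInner ai i (PySem.List.slice b none (some (max_deg - (i : Int) + 1))) 0 out)

def qpoly_mul (a b : List Int) (max_deg : Int) : List Int :=
  qmulOuter b max_deg (PySem.List.slice a none (some (max_deg + 1))) 0
    (List.replicate (max_deg + 1).toNat 0)

-- 'while e:' of _qpoly_pow; e & 1 = e % 2, e >>= 1 = e / 2 on the non-negative e
def qpowLoop (max_deg : Int) (cur result : List Int) (e : Nat) : List Int :=
  if e = 0 then result
  else
    let result' := if e % 2 = 1 then qpoly_mul result cur max_deg else result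
    let e' := e / 2
    if e' = 0 then result' else qpowLoop max_deg (qpoly_mul cur cur max_deg) result' e'
  termination_by e
  decreasing_by omega

-- Python raises ValueError on exp < 0 and IndexError (result[0] = 1) on max_deg < 0; Pre_ excludes both.
def qpoly_pow_py (base : List Int) (exp : Int) (max_deg : Int) : List Int :=
  let result := (List.replicate (max_deg + 1).toNat 0).set 0 1
  let cur := PySem.List.slice base none (some (max_deg + 1)) ++
      List.replicate (max 0 ((max_deg + 1) - (base.length : Int))).toNat 0
  qpowLoop max_deg cur result exp.toNat

-- ===== PORT B =====
-- B's list comprehension over k with a bounded convolution sum; base[k-i] is always in range,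
-- so getD is exact; max(0, k - len(base) + 1) is Nat truncated subtraction k + 1 - base.length.
def altMul (r b : List Int) (n : Nat) : List Int :=
  (List.range n).map (fun k =>
    ∑ i ∈ Finset.Ico (k + 1 - b.length) (k + 1), r.getD i 0 * b.getD (k - i) 0)

def qpoly_pow_py_alt (base : List Int) (exp : Int) (max_deg : Int) : List Int :=
  let n := (max_deg + 1).toNat
  let result := 1 :: List.replicate max_deg.toNat 0
  (List.range exp.toNat).foldl (fun r _ => altMul r base n) result

-- ===== PRECONDITION & SPEC =====
-- Pre_ excludes exactly the inputs where A raises: exp < 0 (ValueError) and max_deg < 0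
-- (IndexError on result[0] = 1); B raises there too (exp < 0) or is degenerate (max_deg < 0).
def Pre_qpoly_pow_py (base : List Int) (exp : Int) (max_deg : Int) : Prop :=
  0 ≤ exp ∧ 0 ≤ max_deg
instance (base : List Int) (exp : Int) (max_deg : Int) : Decidable (Pre_qpoly_pow_py base exp max_deg) := by unfold Pre_qpoly_pow_py; infer_instance

def pvWitness_qpoly_pow_py : List Int × Int × Int := ([1, 2], 3, 4)

def Spec_qpoly_pow_py (base : List Int) (exp : Int) (max_deg : Int) (out : List Int) : Prop := out = qpoly_pow_py_alt base exp max_deg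
instance (base : List Int) (exp : Int) (max_deg : Int) (out : List Int) : Decidable (Spec_qpoly_pow_py base exp max_deg out) := by unfold Spec_qpoly_pow_py; infer_instance

-- ===== CLAIM (what is proved, stated in full; the proofs are below) =====
def Claim_equal_qpoly_pow_py : Prop := ∀ (base : List Int) (exp : Int) (max_deg : Int), Dom_qpoly_pow_py base exp max_deg → Pre_qpoly_pow_py base exp max_deg → Spec_qpoly_pow_py base exp max_deg (qpoly_pow_py base exp max_deg)

-- ===== LEMMAS AND PROOFS =====

-- coefficient-level semantics of the truncated multiplication
def qconv (a b : List Int) (k : Nat) : Int :=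
  ∑ i ∈ Finset.range (k + 1), a.getD i 0 * b.getD (k - i) 0

def qmulS (a b : List Int) (d : Nat) : List Int :=
  (List.range d).map (fun k => qconv a b k)

def toPS (l : List Int) : PowerSeries ℤ := PowerSeries.mk fun n => l.getD n 0

def qpw (c : List Int) (d n : Nat) (r : List Int) : List Int :=
  (List.range n).foldl (fun r _ => qmulS r c d) r

theorem length_qmulInner (ai : Int) (i : Nat) (bs : List Int) (j : Nat) (out : List Int) :
    (qmulInner ai i bs j out).length = out.length := by
  induction bs generalizing j out with
  | nil => rfl
  | cons bj rest ih => simp [qmulInner, ih]; split <;> simp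

theorem getD_set_if (l : List Int) (m k : Nat) (v : Int) (h : m < l.length) :
    (l.set m v).getD k 0 = if k = m then v else l.getD k 0 := by
  rw [List.getD_eq_getElem?_getD, List.getD_eq_getElem?_getD, List.getElem?_set]
  by_cases hk : k = m
  · simp [hk, h]
  · simp [hk, Ne.symm hk]

theorem getD_take (a : List Int) (d t : Nat) (ht : t < d) :
    (a.take d).getD t 0 = a.getD t 0 := by
  rw [List.getD_eq_getElem?_getD, List.getD_eq_getElem?_getD, List.getElem?_take, if_pos ht]

theorem getD_qmulInner (ai : Int) (i : Nat) (bs : List Int) (j : Nat) (out : List Int)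
    (h : i + j + bs.length ≤ out.length) (k : Nat) :
    (qmulInner ai i bs j out).getD k 0 =
      out.getD k 0 + (if i + j ≤ k ∧ k < i + j + bs.length then ai * bs.getD (k - (i + j)) 0 else 0) := by
  induction bs generalizing j out with
  | nil =>
      simp only [qmulInner, List.length_nil, Nat.add_zero]
      rw [if_neg (by omega)]
      ring
  | cons bj rest ih =>
      simp only [qmulInner]
      have hl' : (if bj = 0 then out else out.set (i + j) (out.getD (i + j) 0 + ai * bj)).length
          = out.length := by split <;> simp
      rw [ih (j + 1) _ (by rw [hl']; simp at h ⊢; omega)]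
      have hij : i + j < out.length := by simp at h; omega
      have hgd : (if bj = 0 then out else out.set (i + j) (out.getD (i + j) 0 + ai * bj)).getD k 0
          = if k = i + j then out.getD k 0 + ai * bj else out.getD k 0 := by
        split
        · next hbj => subst hbj; split <;> simp_all
        · rw [getD_set_if _ _ _ _ hij]
          by_cases hk : k = i + j
          · subst hk; simp
          · simp [hk]
      rw [hgd]
      by_cases hk : k = i + j
      · subst hk
        rw [if_neg (show ¬(i + (j + 1) ≤ i + j ∧ i + j < i + (j + 1) + rest.length) by omega),
          if_pos (show i + j ≤ i + j ∧ i + j < i + j + (bj :: rest).length by simp)]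
        simp
      · rw [show (if k = i + j then out.getD k 0 + ai * bj else out.getD k 0) = out.getD k 0 by simp [hk]]
        by_cases hc : i + j ≤ k ∧ k < i + j + (bj :: rest).length
        · rw [if_pos (by simp at hc ⊢; omega), if_pos hc,
            show k - (i + j) = (k - (i + (j + 1))) + 1 by omega, List.getD_cons_succ]
        · rw [if_neg (by simp at hc ⊢; omega), if_neg hc]

theorem length_qmulOuter (b : List Int) (max_deg : Int) (as_ : List Int) (i : Nat) (out : List Int) :
    (qmulOuter b max_deg as_ i out).length = out.length := by
  induction as_ generalizing i out with
  | nil => rfl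
  | cons ai rest ih => simp [qmulOuter, ih]; split <;> simp [length_qmulInner]

theorem getD_qmulOuter (b : List Int) (max_deg : Int) (hm : 0 ≤ max_deg)
    (as_ : List Int) (i : Nat) (out : List Int)
    (hlen : out.length = (max_deg + 1).toNat) (hb : i + as_.length ≤ (max_deg + 1).toNat)
    (k : Nat) (hk : k < (max_deg + 1).toNat) :
    (qmulOuter b max_deg as_ i out).getD k 0 =
      out.getD k 0 + ∑ t ∈ Finset.range as_.length,
        (if i + t ≤ k then as_.getD t 0 * b.getD (k - (i + t)) 0 else 0) := by
  induction as_ generalizing i out with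
  | nil => simp [qmulOuter]
  | cons ai rest ih =>
      simp only [qmulOuter]
      have hi : i < (max_deg + 1).toNat := by simp at hb; omega
      have hsl : PySem.List.slice b none (some (max_deg - (i : Int) + 1))
          = b.take ((max_deg + 1).toNat - i) := by
        rw [PySem.List.slice_to _ (by omega)]
        congr 1
        omega
      have hl' : (if ai = 0 then out
          else qmulInner ai i (PySem.List.slice b none (some (max_deg - (i : Int) + 1))) 0 out).length
          = out.length := by split <;> simp [length_qmulInner]
      rw [ih (i + 1) _ (by rw [hl']; exact hlen) (by simp at hb ⊢; omega)]
      have hout' : (if ai = 0 then out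
          else qmulInner ai i (PySem.List.slice b none (some (max_deg - (i : Int) + 1))) 0 out).getD k 0
          = out.getD k 0 + (if i ≤ k then ai * b.getD (k - i) 0 else 0) := by
        have hblen : (b.take ((max_deg + 1).toNat - i)).length = min ((max_deg + 1).toNat - i) b.length := by
          simp
        split
        · next hai => subst hai; simp
        · rw [hsl, getD_qmulInner ai i _ 0 out (by rw [hblen, hlen]; omega)]
          congr 1
          by_cases hik : i ≤ k
          · by_cases hkb : k - i < b.length
            · rw [if_pos (by rw [hblen]; omega), if_pos hik]
              congr 1
              simp only [Nat.add_zero]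
              rw [List.getD_eq_getElem?_getD, List.getD_eq_getElem?_getD, List.getElem?_take,
                if_pos (by omega)]
            · rw [if_neg (by rw [hblen]; omega), if_pos hik,
                List.getD_eq_default _ _ (by omega)]
              simp
          · rw [if_neg (by omega), if_neg hik]
      rw [hout']
      simp only [List.length_cons]
      rw [Finset.sum_range_succ']
      have hshift : ∀ t ∈ Finset.range rest.length,
          (if i + 1 + t ≤ k then rest.getD t 0 * b.getD (k - (i + 1 + t)) 0 else 0)
          = (if i + (t + 1) ≤ k then (ai :: rest).getD (t + 1) 0 * b.getD (k - (i + (t + 1))) 0 else 0) := by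
        intro t _
        rw [show i + (t + 1) = i + 1 + t by omega, List.getD_cons_succ]
      rw [Finset.sum_congr rfl hshift]
      simp only [Nat.add_zero, List.getD_cons_zero]
      ring

theorem getD_qmulS (a b : List Int) (d k : Nat) (hk : k < d) :
    (qmulS a b d).getD k 0 = qconv a b k := by
  unfold qmulS
  rw [List.getD_eq_getElem?_getD]
  simp [hk]

theorem qpoly_mul_char (a b : List Int) (max_deg : Int) (hm : 0 ≤ max_deg) :
    qpoly_mul a b max_deg = qmulS a b (max_deg + 1).toNat := by
  have hsl : PySem.List.slice a none (some (max_deg + 1)) = a.take (max_deg + 1).toNat :=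
    PySem.List.slice_to _ (by omega)
  have hlen1 : (qpoly_mul a b max_deg).length = (max_deg + 1).toNat := by
    unfold qpoly_mul; rw [length_qmulOuter]; simp
  apply List.ext_getElem
  · rw [hlen1]; simp [qmulS]
  intro k h1 h2
  have hk : k < (max_deg + 1).toNat := by rwa [hlen1] at h1
  rw [← List.getD_eq_getElem _ 0 h1, ← List.getD_eq_getElem _ 0 h2]
  unfold qpoly_mul
  rw [hsl, getD_qmulOuter b max_deg hm _ 0 _ (by simp) (by simp) k hk,
    getD_qmulS a b _ k hk]
  have hrep : (List.replicate (max_deg + 1).toNat (0 : Int)).getD k 0 = 0 := by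
    rw [List.getD_eq_getElem?_getD]; simp
  rw [hrep]
  simp only [zero_add]
  have hsub1 : Finset.range (a.take (max_deg + 1).toNat).length ⊆ Finset.range (max_deg + 1).toNat := by
    intro x hx
    rw [Finset.mem_range] at hx ⊢
    have := a.length_take_le (max_deg + 1).toNat
    omega
  have hsub2 : Finset.range (k + 1) ⊆ Finset.range (max_deg + 1).toNat := by
    intro x hx
    rw [Finset.mem_range] at hx ⊢
    omega
  rw [Finset.sum_subset hsub1
    (by
      intro t ht hts
      rw [Finset.mem_range] at ht
      rw [Finset.mem_range, List.length_take] at hts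
      rw [List.getD_eq_default _ _ (by rw [List.length_take]; omega)]
      simp)]
  rw [show qconv a b k = ∑ t ∈ Finset.range (k + 1),
      (if t ≤ k then (a.take (max_deg + 1).toNat).getD t 0 * b.getD (k - t) 0 else 0) by
    unfold qconv
    refine Finset.sum_congr rfl fun t ht => ?_
    rw [Finset.mem_range] at ht
    rw [if_pos (by omega), getD_take a _ t (by omega)]]
  exact (Finset.sum_subset hsub2
    (by
      intro t ht hts
      rw [Finset.mem_range] at ht
      rw [Finset.mem_range] at hts
      rw [if_neg (by omega)])).symm

theorem qconv_coeff (a b : List Int) (k : Nat) :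
    qconv a b k = PowerSeries.coeff k (toPS a * toPS b) := by
  rw [PowerSeries.coeff_mul, Finset.Nat.sum_antidiagonal_eq_sum_range_succ_mk]
  simp [qconv, toPS]

theorem coeff_mul_congr {f f' g g' : PowerSeries ℤ} {k : ℕ}
    (hf : ∀ n, n ≤ k → PowerSeries.coeff n f = PowerSeries.coeff n f')
    (hg : ∀ n, n ≤ k → PowerSeries.coeff n g = PowerSeries.coeff n g') :
    PowerSeries.coeff k (f * g) = PowerSeries.coeff k (f' * g') := by
  rw [PowerSeries.coeff_mul, PowerSeries.coeff_mul]
  refine Finset.sum_congr rfl fun p hp => ?_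
  rw [Finset.mem_antidiagonal] at hp
  rw [hf p.1 (by omega), hg p.2 (by omega)]

theorem coeff_toPS_qmulS (a b : List Int) (d k : Nat) (hk : k < d) :
    PowerSeries.coeff k (toPS (qmulS a b d)) = PowerSeries.coeff k (toPS a * toPS b) := by
  rw [← qconv_coeff]
  unfold toPS
  rw [PowerSeries.coeff_mk]
  exact getD_qmulS a b d k hk

theorem qmulS_assoc (a b c : List Int) (d : Nat) :
    qmulS (qmulS a b d) c d = qmulS a (qmulS b c d) d := by
  show (List.range d).map (fun k => qconv (qmulS a b d) c k) =
      (List.range d).map (fun k => qconv a (qmulS b c d) k)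
  refine List.map_congr_left fun k hk => ?_
  rw [List.mem_range] at hk
  rw [qconv_coeff, qconv_coeff,
    coeff_mul_congr (fun n hn => coeff_toPS_qmulS a b d n (by omega)) (fun n _ => rfl),
    mul_assoc,
    ← coeff_mul_congr (fun n _ => rfl) (fun n hn => coeff_toPS_qmulS b c d n (by omega))]

theorem qmulS_congr_right (r b b' : List Int) (d : Nat)
    (h : ∀ n, n < d → b.getD n 0 = b'.getD n 0) :
    qmulS r b d = qmulS r b' d := by
  show (List.range d).map (fun k => qconv r b k) = (List.range d).map (fun k => qconv r b' k)
  refine List.map_congr_left fun k hk => ?_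
  rw [List.mem_range] at hk
  unfold qconv
  refine Finset.sum_congr rfl fun i hi => ?_
  rw [Finset.mem_range] at hi
  rw [h (k - i) (by omega)]

theorem qpw_succ (c : List Int) (d n : Nat) (r : List Int) :
    qpw c d (n + 1) r = qmulS (qpw c d n r) c d := by
  simp [qpw, List.range_succ]

theorem qpw_shift (c : List Int) (d n : Nat) (r : List Int) :
    qpw c d n (qmulS r c d) = qpw c d (n + 1) r := by
  induction n with
  | zero => simp [qpw, List.range_succ]
  | succ m ih => rw [qpw_succ, ih]; exact (qpw_succ c d (m + 1) r).symm

theorem qpw_double (c : List Int) (d m : Nat) (r : List Int) :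
    qpw (qmulS c c d) d m r = qpw c d (2 * m) r := by
  induction m with
  | zero => rfl
  | succ m ih =>
      rw [qpw_succ, ih, show 2 * (m + 1) = 2 * m + 1 + 1 by omega,
        qpw_succ, qpw_succ, qmulS_assoc]

theorem qpowLoop_eq_qpw (max_deg : Int) (hm : 0 ≤ max_deg) (e : Nat) (cur result : List Int) :
    qpowLoop max_deg cur result e = qpw cur (max_deg + 1).toNat e result := by
  induction e using Nat.strong_induction_on generalizing cur result with
  | _ e ih =>
    rw [qpowLoop]
    by_cases h0 : e = 0
    · simp [h0, qpw]
    · simp only [h0, if_false]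
      by_cases h2 : e / 2 = 0
      · have he : e = 1 := by omega
        simp [he, qpoly_mul_char _ _ _ hm, qpw]
      · simp only [h2, if_false]
        rw [ih (e / 2) (by omega), qpoly_mul_char _ _ _ hm, qpw_double]
        by_cases hodd : e % 2 = 1
        · simp only [hodd, if_true, qpoly_mul_char _ _ _ hm]
          rw [qpw_shift, show 2 * (e / 2) + 1 = e by omega]
        · simp only [hodd, if_false]
          rw [show 2 * (e / 2) = e by omega]

theorem getD_pad (base : List Int) (max_deg : Int) (hm : 0 ≤ max_deg) (n : Nat)
    (hn : n < (max_deg + 1).toNat) :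
    (PySem.List.slice base none (some (max_deg + 1)) ++
      List.replicate (max 0 ((max_deg + 1) - (base.length : Int))).toNat 0).getD n 0
      = base.getD n 0 := by
  rw [PySem.List.slice_to _ (by omega)]
  by_cases hnb : n < base.length
  · rw [List.getD_eq_getElem?_getD, List.getElem?_append_left (by rw [List.length_take]; omega),
      ← List.getD_eq_getElem?_getD, getD_take base _ n hn]
  · rw [List.getD_eq_default base _ (by omega), List.getD_eq_getElem?_getD,
      List.getElem?_append_right (by rw [List.length_take]; omega)]
    rw [List.getElem?_replicate]
    split <;> rfl

theorem qpw_pad (base : List Int) (max_deg : Int) (hm : 0 ≤ max_deg) (n : Nat) (r : List Int) :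
    qpw (PySem.List.slice base none (some (max_deg + 1)) ++
      List.replicate (max 0 ((max_deg + 1) - (base.length : Int))).toNat 0)
      (max_deg + 1).toNat n r = qpw base (max_deg + 1).toNat n r := by
  induction n generalizing r with
  | zero => rfl
  | succ m ih =>
      rw [qpw_succ, qpw_succ, ih,
        qmulS_congr_right _ _ base _ (fun t ht => getD_pad base max_deg hm t ht)]

-- B's bounded convolution sum equals the full convolution: the dropped indices hit b out of range.
theorem altMul_eq_qmulS (r b : List Int) (n : Nat) : altMul r b n = qmulS r b n := by
  unfold altMul qmulS
  refine List.map_congr_left fun k _ => ?_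
  unfold qconv
  rw [Finset.range_eq_Ico]
  refine Finset.sum_subset (Finset.Ico_subset_Ico (Nat.zero_le _) le_rfl) ?_
  intro i hi his
  rw [Finset.mem_Ico] at hi his
  have : b.length ≤ k - i := by omega
  rw [List.getD_eq_default b _ this, mul_zero]

-- ===== VERDICT (by name: the statement is the Claim_ definition above) =====
theorem qpoly_pow_py_spec : Claim_equal_qpoly_pow_py := by
  intro base exp max_deg _hdom hpre
  obtain ⟨he, hm⟩ := hpre
  unfold Spec_qpoly_pow_py qpoly_pow_py qpoly_pow_py_alt
  dsimp only
  rw [qpowLoop_eq_qpw max_deg hm, qpw_pad base max_deg hm]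
  rw [show (fun (r : List Int) (_ : Nat) => altMul r base (max_deg + 1).toNat)
      = (fun (r : List Int) (_ : Nat) => qmulS r base (max_deg + 1).toNat) by
    funext r t
    exact altMul_eq_qmulS r base (max_deg + 1).toNat]
  have hinit : (List.replicate (max_deg + 1).toNat (0 : Int)).set 0 1
      = 1 :: List.replicate max_deg.toNat 0 := by
    rw [show (max_deg + 1).toNat = max_deg.toNat + 1 by omega, List.replicate_succ]
    rfl
  rw [hinit]
  rfl
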